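-- pv_equiv track=rewrite | github.com/ahmetasarkayaagility/policy_eval_dashboard | app.py | _common_prefix_at_boundary
-- ===== SOURCE A (Python) =====
-- def _common_prefix_at_boundary(names: list[str]) -> str:
--     """Longest common prefix truncated to the last ``_`` or ``-`` boundary."""
--     if len(names) < 2:
--         return ""
--     prefix = names[0]
--     for name in names[1:]:
--         i = 0
--         while i < len(prefix) and i < len(name) and prefix[i] == name[i]:
--             i += 1
--         prefix = prefix[:i]
--         if not prefix:
--             return ""
--     last_sep = -1
--     for i, ch in enumerate(prefix):
--         if ch in ("_", "-"):
--             last_sep = i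
--     if last_sep < 0:
--         return ""
--     candidate = prefix[: last_sep + 1]
--     if all(len(n) > len(candidate) for n in names):
--         return candidate
--     return ""
-- ===== SOURCE B (Python) =====
-- def _common_prefix_at_boundary(names: list[str]) -> str:
--     """Longest common prefix truncated to the last ``_`` or ``-`` boundary."""
--     if len(names) < 2:
--         return ""
--     first = names[0]
--     rest = names[1:]
--     k = min(len(n) for n in names)
--     p = 0
--     while p < k and all(n[p] == first[p] for n in rest):
--         p += 1
--     prefix = first[:p]
--     last_sep = max(prefix.rfind("_"), prefix.rfind("-"))
--     if last_sep < 0: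
--         return ""
--     candidate = prefix[: last_sep + 1]
--     if all(len(n) > len(candidate) for n in names):
--         return candidate
--     return ""
-- ===== Notes on version B (the rewrite author's own statement) =====
-- stated objective: alternative
-- what changed: Replaces A's pairwise left-fold of two-string prefix scans with a single column-major scan over character positions of all names at once, and replaces A's enumerate loop for the last separator with max of two rfind calls.
import Mathlib
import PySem

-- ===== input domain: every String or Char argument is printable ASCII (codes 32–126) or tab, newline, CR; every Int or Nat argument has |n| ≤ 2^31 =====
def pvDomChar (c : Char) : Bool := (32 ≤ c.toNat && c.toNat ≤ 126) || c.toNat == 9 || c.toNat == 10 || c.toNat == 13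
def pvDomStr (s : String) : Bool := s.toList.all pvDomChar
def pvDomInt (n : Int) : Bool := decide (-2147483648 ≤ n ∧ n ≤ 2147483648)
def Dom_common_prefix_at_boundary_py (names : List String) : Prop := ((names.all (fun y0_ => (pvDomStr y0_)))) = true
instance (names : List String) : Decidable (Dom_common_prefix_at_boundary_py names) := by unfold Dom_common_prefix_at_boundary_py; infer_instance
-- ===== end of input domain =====

-- B replaces A's pairwise prefix folding with a single column-major scan and rfind-based
-- separator lookup; a genuinely different decomposition of the same O(total chars) task.


-- ===== PORT A =====
-- inner while loop of A: scan i while chars agree, then `prefix = prefix[:i]`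
-- (structural recursion over both char lists computes exactly that slice).
def lcpA : List Char → List Char → List Char
  | a :: as, b :: bs => if a = b then a :: lcpA as bs else []
  | _, _ => []

-- A's for-loop over names[1:]; `none` = the early `return ""` when the prefix becomes empty.
def aLoop : List Char → List (List Char) → Option (List Char)
  | pfx, [] => some pfx
  | pfx, n :: rest =>
    let p := lcpA pfx n
    if p.isEmpty then none else aLoop p rest

def common_prefix_at_boundary_py (names : List String) : String :=
  if names.length < 2 then "" else
  match names with
  | [] => ""
  | n0 :: rest =>
    match aLoop n0.toList (rest.map String.toList) with
    | none => ""
    | some pfx =>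
      -- for i, ch in enumerate(prefix): if ch in ("_","-"): last_sep = i
      let lastSep : Int := (PySem.List.enumerate pfx).foldl
        (fun acc ic => if ic.2 == '_' || ic.2 == '-' then ic.1 else acc) (-1)
      if lastSep < 0 then "" else
      -- prefix[:last_sep+1] with last_sep ≥ 0 is exactly `take`; len(n) is n.toList.length
      let candidate := pfx.take (lastSep + 1).toNat
      if names.all (fun n => decide (candidate.length < n.toList.length)) then String.ofList candidate
      else ""

-- ===== PORT B =====
-- port of str.rfind(c) for a one-char needle: highest index of c, -1 if absent (exact).
def pyRfind1 : List Char → Char → Int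
  | [], _ => -1
  | x :: xs, c =>
    let r := pyRfind1 xs c
    if 0 ≤ r then r + 1 else if x == c then 0 else -1

-- B's column scan: first position p < k at which some name disagrees with first, else k
-- (indices stay < k ≤ every length, so getD is exactly Python's n[p]).
def bScan (first : List Char) (rest : List (List Char)) (k : Nat) (p : Nat) : Nat :=
  if p < k then
    if rest.all (fun n => n.getD p ' ' == first.getD p ' ') then bScan first rest k (p + 1) else p
  else p
termination_by k - p

def common_prefix_at_boundary_py_alt (names : List String) : String :=
  if names.length < 2 then "" else
  match names with
  | [] => ""
  | n0 :: rs =>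
    let first := n0.toList
    let rest := rs.map String.toList
    -- k = min(len(n) for n in names)
    let k := (rest.map List.length).foldl (fun m n => min m n) first.length
    let pfx := first.take (bScan first rest k 0)
    let lastSep := max (pyRfind1 pfx '_') (pyRfind1 pfx '-')
    if lastSep < 0 then "" else
    let candidate := pfx.take (lastSep + 1).toNat
    if names.all (fun n => decide (candidate.length < n.toList.length)) then String.ofList candidate
    else ""

-- ===== PRECONDITION & SPEC =====
def Spec_common_prefix_at_boundary_py (names : List String) (out : String) : Prop := out = common_prefix_at_boundary_py_alt names
instance (names : List String) (out : String) : Decidable (Spec_common_prefix_at_boundary_py names out) := by unfold Spec_common_prefix_at_boundary_py; infer_instance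

-- ===== CLAIM (what is proved, stated in full; the proofs are below) =====
def Claim_equal_common_prefix_at_boundary_py : Prop := ∀ (names : List String), Dom_common_prefix_at_boundary_py names → Spec_common_prefix_at_boundary_py names (common_prefix_at_boundary_py names)

-- ===== LEMMAS AND PROOFS =====

theorem lcpA_nil_left (b : List Char) : lcpA [] b = [] := by
  cases b <;> simp [lcpA]

theorem foldl_lcpA_nil (rest : List (List Char)) : rest.foldl lcpA [] = [] := by
  induction rest with
  | nil => rfl
  | cons n rest ih => simpa [List.foldl, lcpA_nil_left] using ih

-- lcpA a b is a take of a, bounded by both lengths, agreeing pointwise, maximal.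
theorem lcpA_spec (a b : List Char) :
    ∃ m, lcpA a b = a.take m ∧ m ≤ a.length ∧ m ≤ b.length ∧
      (∀ i < m, b.getD i ' ' = a.getD i ' ') ∧
      (m < a.length → m < b.length → b.getD m ' ' ≠ a.getD m ' ') := by
  induction a generalizing b with
  | nil =>
    exact ⟨0, by simp [lcpA_nil_left], by simp, by simp, by simp, by simp⟩
  | cons x as ih =>
    cases b with
    | nil =>
      exact ⟨0, by simp [lcpA], by simp, by simp, by simp, by simp⟩
    | cons y bs =>
      by_cases hxy : x = y
      · obtain ⟨m, he, ha, hb, hag, hmx⟩ := ih bs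
        subst hxy
        refine ⟨m + 1, by simp [lcpA, he], by simpa using ha, by simpa using hb, ?_, ?_⟩
        · intro i hi
          cases i with
          | zero => simp
          | succ j => simpa using hag j (by omega)
        · intro h1 h2
          simpa using hmx (by simpa using h1) (by simpa using h2)
      · refine ⟨0, by simp [lcpA, hxy], by simp, by simp, by simp, ?_⟩
        intro _ _
        simp
        exact fun h => hxy h.symm

-- A's loop with early return computes the plain fold (the early "" case has empty fold).
theorem aLoop_eq_foldl (rest : List (List Char)) (pfx : List Char) :
    (aLoop pfx rest = none → rest.foldl lcpA pfx = []) ∧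
    (∀ q, aLoop pfx rest = some q → q = rest.foldl lcpA pfx) := by
  induction rest generalizing pfx with
  | nil => simp [aLoop]
  | cons n rest ih =>
    by_cases h : (lcpA pfx n).isEmpty
    · have he : lcpA pfx n = [] := by simpa [List.isEmpty_iff] using h
      simp [aLoop, he, List.foldl, foldl_lcpA_nil]
    · simpa [aLoop, h, List.foldl] using ih (lcpA pfx n)

theorem getD_take_of_lt (l : List Char) (m i : Nat) (h : i < m) (d : Char) :
    (l.take m).getD i d = l.getD i d := by
  simp [List.getD_eq_getElem?_getD, h]

-- the fold of pairwise prefixes: characterization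
theorem foldl_lcpA_spec (rest : List (List Char)) (first : List Char) :
    ∃ M, rest.foldl lcpA first = first.take M ∧ M ≤ first.length ∧
      (∀ n ∈ rest, M ≤ n.length) ∧
      (∀ n ∈ rest, ∀ i < M, n.getD i ' ' = first.getD i ' ') ∧
      (M < first.length → (∀ n ∈ rest, M < n.length) →
        ∃ n ∈ rest, n.getD M ' ' ≠ first.getD M ' ') := by
  induction rest generalizing first with
  | nil =>
    exact ⟨first.length, by simp, le_refl _, by simp, by simp, by omega⟩
  | cons n rest ih =>
    obtain ⟨m, he, ham, hbm, hagp, hmaxp⟩ := lcpA_spec first n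
    obtain ⟨M, hE, hM1, hM2, hag, hmax⟩ := ih (first.take m)
    have hlt : (first.take m).length = min m first.length := by simp
    have hMm : M ≤ m := le_trans hM1 (by omega)
    have hMf : M ≤ first.length := le_trans hM1 (by omega)
    refine ⟨M, ?_, hMf, ?_, ?_, ?_⟩
    · calc (n :: rest).foldl lcpA first = rest.foldl lcpA (first.take m) := by
            simp [List.foldl, he]
        _ = (first.take m).take M := hE
        _ = first.take M := by rw [List.take_take]; congr 1; omega
    · intro n' hn'
      rcases List.mem_cons.mp hn' with h | h
      · subst h; exact le_trans hMm hbm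
      · exact hM2 n' h
    · intro n' hn' i hi
      rcases List.mem_cons.mp hn' with h | h
      · subst h; exact hagp i (lt_of_lt_of_le hi hMm)
      · rw [hag n' h i hi, getD_take_of_lt]
        exact lt_of_lt_of_le hi hMm
    · intro h1 h2
      by_cases hMm' : M < m
      · obtain ⟨n', hn', hne⟩ := hmax (by omega) (fun n'' h'' => h2 n'' (List.mem_cons_of_mem _ h''))
        refine ⟨n', List.mem_cons_of_mem _ hn', ?_⟩
        rwa [getD_take_of_lt _ _ _ hMm'] at hne
      · have hMeq : M = m := by omega
        subst hMeq
        exact ⟨n, by simp, hmaxp h1 (h2 n (by simp))⟩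

-- bScan reaches exactly the fold's M
theorem bScan_eq (first : List Char) (rest : List (List Char)) (k M p : Nat)
    (hMk : M ≤ k)
    (hagree : ∀ n ∈ rest, ∀ i < M, n.getD i ' ' = first.getD i ' ')
    (hstop : M < k → ∃ n ∈ rest, n.getD M ' ' ≠ first.getD M ' ')
    (hp : p ≤ M) : bScan first rest k p = M := by
  have key : ∀ d q, q ≤ M → M - q = d → bScan first rest k q = M := by
    intro d
    induction d with
    | zero =>
      intro q hq hd
      have hqM : q = M := by omega
      subst hqM
      rw [bScan]
      by_cases hk : q < k
      · obtain ⟨n, hn, hne⟩ := hstop hk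
        have hall : rest.all (fun n => n.getD q ' ' == first.getD q ' ') = false := by
          rw [List.all_eq_false]
          exact ⟨n, hn, by simpa using hne⟩
        simp only [if_pos hk, hall, Bool.false_eq_true, if_false]
      · simp [hk]
    | succ d ihd =>
      intro q hq hd
      have hqk : q < k := by omega
      have hall : rest.all (fun n => n.getD q ' ' == first.getD q ' ') = true := by
        rw [List.all_eq_true]
        intro n hn
        simpa using hagree n hn q (by omega)
      rw [bScan]
      simp only [hqk, if_true, hall]
      exact ihd (q + 1) (by omega) (by omega)
  exact key (M - p) p hp rfl

-- foldl min facts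
theorem foldl_min_le_init (l : List Nat) (a : Nat) : l.foldl (fun m n => min m n) a ≤ a := by
  induction l generalizing a with
  | nil => simp
  | cons x l ih => exact le_trans (ih _) (min_le_left _ _)

theorem foldl_min_le_mem (l : List Nat) (a : Nat) (x : Nat) (hx : x ∈ l) :
    l.foldl (fun m n => min m n) a ≤ x := by
  induction l generalizing a with
  | nil => cases hx
  | cons y l ih =>
    rcases List.mem_cons.mp hx with h | h
    · subst h; exact le_trans (foldl_min_le_init l (min a x)) (min_le_right a x)
    · exact ih _ h

theorem le_foldl_min (l : List Nat) (a m : Nat) (ha : m ≤ a) (hl : ∀ x ∈ l, m ≤ x) :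
    m ≤ l.foldl (fun mm n => min mm n) a := by
  induction l generalizing a with
  | nil => simpa
  | cons x l ih =>
    exact ih _ (le_min ha (hl x (by simp))) (fun y hy => hl y (by simp [hy]))

theorem pyRfind1_ge (l : List Char) (c : Char) : -1 ≤ pyRfind1 l c := by
  induction l with
  | nil => simp [pyRfind1]
  | cons x xs ih => simp only [pyRfind1]; split_ifs <;> omega

-- last-separator scan = max of the two rfinds
theorem lastSep_eq (l : List Char) (s : Int) (acc : Int) :
    (PySem.List.enumerate l s).foldl
      (fun acc ic => if ic.2 == '_' || ic.2 == '-' then ic.1 else acc) acc =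
    (if 0 ≤ max (pyRfind1 l '_') (pyRfind1 l '-')
     then s + max (pyRfind1 l '_') (pyRfind1 l '-') else acc) := by
  induction l generalizing s acc with
  | nil => simp [pyRfind1, PySem.List.enumerate_nil]
  | cons x xs ih =>
    rw [PySem.List.enumerate_cons, List.foldl_cons, ih]
    have h1 := pyRfind1_ge xs '_'
    have h2 := pyRfind1_ge xs '-'
    by_cases hu : x = '_'
    · subst hu
      simp only [pyRfind1]
      simp
      split_ifs <;> omega
    · by_cases hd : x = '-'
      · subst hd
        simp only [pyRfind1]
        simp
        split_ifs <;> omega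
      · simp only [pyRfind1]
        simp [beq_iff_eq, hu, hd]
        split_ifs <;> omega

theorem common_prefix_at_boundary_py_spec : Claim_equal_common_prefix_at_boundary_py := by
  intro names _
  unfold Spec_common_prefix_at_boundary_py
  cases names with
  | nil => rfl
  | cons n0 rs =>
    show common_prefix_at_boundary_py (n0 :: rs) = common_prefix_at_boundary_py_alt (n0 :: rs)
    by_cases hlen : (n0 :: rs).length < 2
    · have hrs : rs = [] := by
        cases rs with
        | nil => rfl
        | cons a l => simp at hlen
      subst hrs; rfl
    · obtain ⟨M, hE, hMf, hMr, hag, hmax⟩ := foldl_lcpA_spec (rs.map String.toList) n0.toList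
      set first := n0.toList with hfirst
      set rest := rs.map String.toList with hrest
      set k := (rest.map List.length).foldl (fun m n => min m n) first.length with hk
      have hkf : k ≤ first.length := foldl_min_le_init _ _
      have hkr : ∀ n ∈ rest, k ≤ n.length := fun n hn =>
        foldl_min_le_mem _ _ _ (List.mem_map_of_mem hn)
      have hMk : M ≤ k := le_foldl_min _ _ _ hMf (fun x hx => by
        obtain ⟨n, hn, rfl⟩ := List.mem_map.mp hx; exact hMr n hn)
      have hstop : M < k → ∃ n ∈ rest, n.getD M ' ' ≠ first.getD M ' ' := fun h =>
        hmax (lt_of_lt_of_le h hkf) (fun n hn => lt_of_lt_of_le h (hkr n hn))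
      have hbs : bScan first rest k 0 = M :=
        bScan_eq first rest k M 0 hMk hag hstop (Nat.zero_le _)
      simp only [common_prefix_at_boundary_py, common_prefix_at_boundary_py_alt, hlen, if_false]
      rw [hbs]
      cases haL : aLoop first rest with
      | none =>
        have hnil : rest.foldl lcpA first = [] := (aLoop_eq_foldl rest first).1 haL
        rw [hE] at hnil
        rw [hnil]
        simp [pyRfind1]
      | some q =>
        have hq : q = first.take M := by rw [(aLoop_eq_foldl rest first).2 q haL, hE]
        dsimp only
        rw [← hq, lastSep_eq q 0 (-1)]
        by_cases hL : 0 ≤ max (pyRfind1 q '_') (pyRfind1 q '-')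
        · rw [if_pos hL, zero_add]
        · rw [if_neg hL]
          have h2 : max (pyRfind1 q '_') (pyRfind1 q '-') < 0 := by omega
          rw [if_pos (by norm_num : (-1 : Int) < 0), if_pos h2]
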